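-- pv_equiv track=rewrite | github.com/rlaPHOENiX/vsphoenix | pvsfunc/helpers.py | list_select_every
-- ===== SOURCE A (Python) =====
-- from typing import Iterable, List
--
-- def list_select_every(data: list, cycle: int, offsets: (set, Iterable[int]), inverse: bool = False) -> list:
--     """
--     Same as VapourSynth's core.std.SelectEvery but for generic list data, and inverse.
--     Don't use this as a replacement to core.std.SelectEvery, this should only be used on generic list data.
--     """
--     if not isinstance(cycle, int) or cycle < 1:
--         raise ValueError("Cycle must be an int greater than or equal to 1.")
--     if not offsets:
--         raise ValueError("Offsets must not be empty.")
--     if not isinstance(offsets, set):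
--         offsets = set(offsets)
--     if not isinstance(inverse, bool) and inverse not in (0, 1):
--         raise ValueError("Inverse must be a bool or int bool.")
--
--     if not data:
--         return data
--
--     return [x for n, x in enumerate(data) if (n % cycle in offsets) ^ inverse]
-- ===== SOURCE B (Python) =====
-- def list_select_every(data: list, cycle: int, offsets, inverse: bool = False) -> list:
--     if not isinstance(cycle, int) or cycle < 1:
--         raise ValueError("Cycle must be an int greater than or equal to 1.")
--     if not offsets:
--         raise ValueError("Offsets must not be empty.")
--     # Block-indexing algorithm: resolve once which residues of a cycle are kept
--     # (inverting here if requested), then jump straight to the selected positions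
--     # of each cycle-length block instead of scanning every element.
--     # Residues >= len(data) can never be reached (base >= 0), so cap at len(data).
--     keep = set(offsets)
--     n = len(data)
--     sel = [r for r in range(min(cycle, n)) if (r in keep) != bool(inverse)]
--     out = []
--     for base in range(0, n, cycle):
--         for r in sel:
--             i = base + r
--             if i < n:
--                 out.append(data[i])
--     return out
-- ===== Notes on version B (the rewrite author's own statement) =====
-- stated objective: alternative
-- what changed: Instead of enumerating every element and testing n % cycle against the offset set, B resolves the kept residues of one cycle up front (capped at len(data), inverted there if requested) and directly indexes those positions in each cycle-length block; same cost in practice, different traversal.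
import Mathlib
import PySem

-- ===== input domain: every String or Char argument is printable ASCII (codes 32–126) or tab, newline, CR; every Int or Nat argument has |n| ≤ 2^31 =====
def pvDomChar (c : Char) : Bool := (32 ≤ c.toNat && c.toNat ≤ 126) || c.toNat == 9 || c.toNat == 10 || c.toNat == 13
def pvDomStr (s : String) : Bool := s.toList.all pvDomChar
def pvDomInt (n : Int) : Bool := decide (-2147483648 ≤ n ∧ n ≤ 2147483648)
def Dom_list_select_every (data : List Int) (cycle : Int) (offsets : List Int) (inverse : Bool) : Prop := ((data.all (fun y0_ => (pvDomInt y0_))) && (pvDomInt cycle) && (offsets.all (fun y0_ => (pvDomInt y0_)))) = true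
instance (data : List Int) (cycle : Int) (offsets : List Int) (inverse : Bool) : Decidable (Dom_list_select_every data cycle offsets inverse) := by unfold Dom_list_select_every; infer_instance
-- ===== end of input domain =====

-- B resolves the kept residues of one cycle up front and directly indexes those positions in
-- each cycle-length block, instead of A's scan of every element with a per-element modulo test.

-- ===== PORT A =====
-- [x for n, x in enumerate(data) if (n % cycle in offsets) ^ inverse], after offsets = set(offsets)
def list_select_every (data : List Int) (cycle : Int) (offsets : List Int) (inverse : Bool) : List Int :=
  if data = [] then data
  else
    let offs : PySem.Set Int := PySem.Set.ofList offsets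
    ((PySem.List.enumerate data).filter
        (fun p => (PySem.Set.contains offs (PySem.Int.mod p.1 cycle)) != inverse)).map (·.2)

-- ===== PORT B =====
-- Source B: keep = set(offsets); n = len(data); sel = [r for r in range(min(cycle, n)) if (r in keep) != bool(inverse)];
-- then for base in range(0, n, cycle): for r in sel: if base+r < n: out.append(data[base+r]).
-- data[base+r] is ported as pyGet? …  .toList — exact, since 0 ≤ base+r < n there, so pyGet? is some.
def list_select_every_alt (data : List Int) (cycle : Int) (offsets : List Int) (inverse : Bool) : List Int :=
  let keep : PySem.Set Int := PySem.Set.ofList offsets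
  let n : Int := (data.length : Int)
  let sel : List Int := (PySem.List.pyRange 0 (min cycle n) 1).filter (fun r => PySem.Set.contains keep r != inverse)
  (PySem.List.pyRange 0 n cycle).foldl
    (fun out base =>
      sel.foldl (fun out r =>
        let i := base + r
        if i < n then out ++ (PySem.List.pyGet? data i).toList else out) out)
    []

-- ===== PRECONDITION & SPEC =====
-- A raises ValueError when cycle < 1 or offsets is empty; exactly those inputs are excluded.
def Pre_list_select_every (data : List Int) (cycle : Int) (offsets : List Int) (inverse : Bool) : Prop :=
  1 ≤ cycle ∧ offsets ≠ []
instance (data : List Int) (cycle : Int) (offsets : List Int) (inverse : Bool) : Decidable (Pre_list_select_every data cycle offsets inverse) := by unfold Pre_list_select_every; infer_instance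

def pvWitness_list_select_every : List Int × Int × List Int × Bool := ([7, 8, 9, 10, 11], 2, [0], false)

def Spec_list_select_every (data : List Int) (cycle : Int) (offsets : List Int) (inverse : Bool) (out : List Int) : Prop := out = list_select_every_alt data cycle offsets inverse
instance (data : List Int) (cycle : Int) (offsets : List Int) (inverse : Bool) (out : List Int) : Decidable (Spec_list_select_every data cycle offsets inverse out) := by unfold Spec_list_select_every; infer_instance

-- ===== CLAIM (what is proved, stated in full; the proofs are below) =====
def Claim_equal_list_select_every : Prop := ∀ (data : List Int) (cycle : Int) (offsets : List Int) (inverse : Bool), Dom_list_select_every data cycle offsets inverse → Pre_list_select_every data cycle offsets inverse → Spec_list_select_every data cycle offsets inverse (list_select_every data cycle offsets inverse)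

-- ===== LEMMAS AND PROOFS =====

-- the residue test both programs apply, and the common 'selected indices' normal form
def pvQ (offsets : List Int) (inverse : Bool) (r : Int) : Bool :=
  PySem.Set.contains (PySem.Set.ofList offsets) r != inverse

def pvF (cycle : Int) (offsets : List Int) (inverse : Bool) (j : Nat) : Bool :=
  pvQ offsets inverse ((j % cycle.toNat : Nat) : Int)

def pvRHS (cycle : Int) (offsets : List Int) (inverse : Bool) (data : List Int) : List Int :=
  (List.range data.length).flatMap
    (fun j => if pvF cycle offsets inverse j then (data[j]?).toList else [])

def pvSel (offsets : List Int) (inverse : Bool) (m : Int) : List Int :=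
  (PySem.List.pyRange 0 m 1).filter (pvQ offsets inverse)

theorem pv_flatMap_filter {α β : Type} (p : α → Bool) (g : α → List β) (l : List α) :
    (l.filter p).flatMap g = l.flatMap (fun x => if p x then g x else []) := by
  induction l with
  | nil => simp
  | cons x xs ih => rw [List.filter_cons]; split <;> simp_all

theorem pv_pyRange_cons (a b s : Int) (hs : 0 < s) (hab : a < b) :
    PySem.List.pyRange a b s = a :: PySem.List.pyRange (a + s) b s := by
  rw [PySem.List.pyRange_of_pos _ _ hs, PySem.List.pyRange_of_pos _ _ hs, if_pos hab]
  by_cases h2 : a + s < b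
  · rw [if_pos h2]
    have hq : 0 ≤ (b - a - 1) / s := Int.ediv_nonneg (by omega) (by omega)
    have hdiv : (b - a + s - 1) / s = (b - a - 1) / s + 1 := by
      rw [show b - a + s - 1 = b - a - 1 + 1 * s by ring]
      exact Int.add_mul_ediv_right (b - a - 1) 1 (by omega : s ≠ 0)
    have hcnt : (b - (a + s) + s - 1) = b - a - 1 := by ring
    rw [hcnt, hdiv, show ((b - a - 1) / s + 1).toNat = ((b - a - 1) / s).toNat + 1 by omega,
      List.range_succ_eq_map]
    simp only [List.map_cons, List.map_map, Nat.cast_zero, mul_zero, add_zero]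
    congr 1
    apply List.map_congr_left
    intro k _
    simp only [Function.comp_apply, Nat.succ_eq_add_one]
    push_cast; ring
  · rw [if_neg h2]
    have hdiv : (b - a + s - 1) / s = 1 := by
      rw [← PySem.Int.floordiv_eq_ediv_of_pos hs, PySem.Int.floordiv_eq_iff_of_pos hs]
      constructor <;> nlinarith
    rw [hdiv]
    simp

theorem pv_pyRange_shift (a b s : Int) (hs : 0 < s) :
    PySem.List.pyRange (a + s) b s = (PySem.List.pyRange a (b - s) s).map (· + s) := by
  rw [PySem.List.pyRange_of_pos _ _ hs, PySem.List.pyRange_of_pos _ _ hs]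
  have hiff : (a + s < b) ↔ (a < b - s) := by omega
  have hcnt : b - (a + s) + s - 1 = b - s - a + s - 1 := by ring
  rw [hcnt]
  simp only [hiff, List.map_map]
  apply List.map_congr_left
  intro k _
  simp only [Function.comp_apply]
  ring

-- one block: the kept residues of one cycle, directly indexed, give exactly the selected
-- elements among the first min(cycle, len) positions
theorem pv_flatMap_congr {α β : Type} {l : List α} {f g : α → List β}
    (h : ∀ a ∈ l, f a = g a) : l.flatMap f = l.flatMap g := by
  rw [List.flatMap_def, List.flatMap_def, List.map_congr_left h]

theorem pv_block (cycle m : Int) (offsets : List Int) (inverse : Bool) (hcy : 1 ≤ cycle)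
    (hm0 : 0 ≤ m) (hm2 : m ≤ cycle) (data : List Int)
    (hm1 : min cycle.toNat data.length ≤ m.toNat) :
    (pvSel offsets inverse m).flatMap
        (fun r => if r < (data.length : Int) then (PySem.List.pyGet? data r).toList else [])
      = (List.range (min cycle.toNat data.length)).flatMap
          (fun j => if pvF cycle offsets inverse j then (data[j]?).toList else []) := by
  have hcore : ∀ m' : Nat, m' ≤ cycle.toNat → m' ≤ data.length →
      (List.range m').flatMap
          (fun k : Nat => if (pvQ offsets inverse ∘ fun k : Nat => (k : Int)) k = true then
            (if ((k : Nat) : Int) < (data.length : Int) then (PySem.List.pyGet? data ((k : Nat) : Int)).toList else [])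
          else [])
        = (List.range m').flatMap
            (fun j => if pvF cycle offsets inverse j then (data[j]?).toList else []) := by
    intro m' hmc hml
    apply pv_flatMap_congr
    intro k hk
    have hk' : k < m' := List.mem_range.mp hk
    have h1 : ((k : Nat) : Int) < (data.length : Int) := by exact_mod_cast Nat.lt_of_lt_of_le hk' hml
    have h2 : pvF cycle offsets inverse k = pvQ offsets inverse (k : Int) := by
      unfold pvF; rw [Nat.mod_eq_of_lt (by omega)]
    simp only [Function.comp_apply, if_pos h1, PySem.List.pyGet?_natCast, h2]
  unfold pvSel
  rw [PySem.List.pyRange_one]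
  simp only [zero_add, sub_zero, List.filter_map, pv_flatMap_filter, List.flatMap_map]
  rw [show m.toNat = min cycle.toNat data.length + (m.toNat - min cycle.toNat data.length) by
      omega,
    List.range_add, List.flatMap_append, List.flatMap_map]
  have hn : ∀ a ∈ List.range (m.toNat - min cycle.toNat data.length),
      (if (pvQ offsets inverse ∘ fun k : Nat => (k : Int)) (min cycle.toNat data.length + a) = true then
        (if ((min cycle.toNat data.length + a : Nat) : Int) < (data.length : Int) then
          (PySem.List.pyGet? data ((min cycle.toNat data.length + a : Nat) : Int)).toList else [])
      else []) = ([] : List Int) := by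
    intro a ha
    have ha' : a < m.toNat - min cycle.toNat data.length := List.mem_range.mp ha
    have hlt : ¬(((min cycle.toNat data.length + a : Nat) : Int) < (data.length : Int)) := by
      exact_mod_cast (by omega : ¬(min cycle.toNat data.length + a < data.length))
    rw [Function.comp_apply, if_neg hlt, ite_self]
  rw [pv_flatMap_congr hn,
    hcore (min cycle.toNat data.length) (by omega) (by omega)]
  simp

-- B's nested appending folds are the flat list of per-block, per-residue picks
theorem pv_B_flat (data : List Int) (cycle : Int) (sel : List Int) :
    (PySem.List.pyRange 0 (data.length : Int) cycle).foldl
        (fun out base =>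
          sel.foldl (fun out r =>
            if base + r < (data.length : Int) then out ++ (PySem.List.pyGet? data (base + r)).toList
            else out) out)
        []
      = (PySem.List.pyRange 0 (data.length : Int) cycle).flatMap
          (fun base => sel.flatMap
            (fun r => if base + r < (data.length : Int) then
              (PySem.List.pyGet? data (base + r)).toList else [])) := by
  have hinner : ∀ (out : List Int) (base : Int),
      sel.foldl (fun out r =>
          if base + r < (data.length : Int) then out ++ (PySem.List.pyGet? data (base + r)).toList
          else out) out
        = out ++ sel.flatMap (fun r => if base + r < (data.length : Int) then
            (PySem.List.pyGet? data (base + r)).toList else []) := by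
    intro out base
    rw [← PySem.List.foldl_append_eq_flatMap]
    apply PySem.List.foldl_congr_mem
    intro acc r _
    split <;> simp
  rw [PySem.List.foldl_congr_mem _ _
      (fun out base => out ++ sel.flatMap (fun r => if base + r < (data.length : Int) then
        (PySem.List.pyGet? data (base + r)).toList else [])) _
      (fun acc base _ => hinner acc base),
    PySem.List.foldl_append_eq_flatMap]
  simp

-- the block-indexing traversal enumerates exactly the selected positions, in order
theorem pv_main (cycle m : Int) (offsets : List Int) (inverse : Bool) (hcy : 1 ≤ cycle)
    (hm0 : 0 ≤ m) (hm2 : m ≤ cycle) :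
    ∀ (N : Nat) (data : List Int), data.length ≤ N →
      min cycle.toNat data.length ≤ m.toNat →
      (PySem.List.pyRange 0 (data.length : Int) cycle).flatMap
          (fun base => (pvSel offsets inverse m).flatMap
            (fun r => if base + r < (data.length : Int) then
              (PySem.List.pyGet? data (base + r)).toList else []))
        = pvRHS cycle offsets inverse data := by
  intro N
  induction N with
  | zero =>
    intro data hlen _
    have : data = [] := List.eq_nil_of_length_eq_zero (by omega)
    subst this
    rw [PySem.List.pyRange_of_pos _ _ (by omega : (0:Int) < cycle)]
    simp [pvRHS]
  | succ N ih =>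
    intro data hlen hm1
    by_cases h0 : data = []
    · subst h0
      rw [PySem.List.pyRange_of_pos _ _ (by omega : (0:Int) < cycle)]
      simp [pvRHS]
    · have hpos : 0 < data.length := List.length_pos_iff.mpr h0
      rw [pv_pyRange_cons 0 _ cycle (by omega) (by exact_mod_cast hpos), List.flatMap_cons,
        pv_pyRange_shift, List.flatMap_map]
      · simp only [zero_add]
        by_cases hC : (data.length : Int) ≤ cycle
        · rw [PySem.List.pyRange_of_pos _ _ (by omega : (0:Int) < cycle),
            if_neg (by omega : ¬ (0:Int) < (data.length : Int) - cycle)]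
          simp only [List.range_zero, List.map_nil, List.flatMap_nil, List.append_nil]
          rw [pv_block cycle m offsets inverse hcy hm0 hm2 data hm1,
            Nat.min_eq_right (by omega : data.length ≤ cycle.toNat)]
          rfl
        · have hCl : cycle.toNat < data.length := by omega
          have hrest : ((data.drop cycle.toNat).length : Int) = (data.length : Int) - cycle := by
            rw [List.length_drop]; omega
          have htail : List.flatMap
              (fun a => List.flatMap
                (fun r => if a + cycle + r < (data.length : Int) then
                  (PySem.List.pyGet? data (a + cycle + r)).toList else [])
                (pvSel offsets inverse m))
              (PySem.List.pyRange 0 ((data.length : Int) - cycle) cycle)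
              = pvRHS cycle offsets inverse (data.drop cycle.toNat) := by
            rw [← hrest, ← ih (data.drop cycle.toNat) (by rw [List.length_drop]; omega)
              (by rw [List.length_drop]; omega)]
            apply pv_flatMap_congr
            intro base hbase
            obtain ⟨hb0, hb1, -⟩ := (PySem.List.mem_pyRange_iff_of_pos (by omega) base).mp hbase
            apply pv_flatMap_congr
            intro r hr
            have hr' : 0 ≤ r ∧ r < m := by
              have := List.mem_filter.mp hr
              exact PySem.List.mem_pyRange_one.mp this.1
            have hcond : (base + cycle + r < (data.length : Int)) ↔
                (base + r < ((data.drop cycle.toNat).length : Int)) := by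
              rw [hrest]; omega
            by_cases hlt : base + r < ((data.drop cycle.toNat).length : Int)
            · rw [if_pos (hcond.mpr hlt), if_pos hlt]
              have hidx : base + cycle + r = ((cycle.toNat + (base + r).toNat : Nat) : Int) := by
                push_cast; omega
              have hidx2 : base + r = (((base + r).toNat : Nat) : Int) := by omega
              rw [hidx, PySem.List.pyGet?_natCast, hidx2, PySem.List.pyGet?_natCast,
                List.getElem?_drop, Int.toNat_natCast]
            · rw [if_neg (fun h => hlt (hcond.mp h)), if_neg hlt]
          rw [htail, pv_block cycle m offsets inverse hcy hm0 hm2 data hm1,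
            Nat.min_eq_left (by omega : cycle.toNat ≤ data.length)]
          have hsplit : pvRHS cycle offsets inverse data
              = (List.range cycle.toNat).flatMap
                  (fun j => if pvF cycle offsets inverse j then (data[j]?).toList else [])
                ++ pvRHS cycle offsets inverse (data.drop cycle.toNat) := by
            unfold pvRHS
            rw [show data.length = cycle.toNat + (data.drop cycle.toNat).length by
                rw [List.length_drop]; omega,
              List.range_add, List.flatMap_append, List.flatMap_map]
            congr 1
            apply pv_flatMap_congr
            intro j _
            have hF : pvF cycle offsets inverse (cycle.toNat + j) = pvF cycle offsets inverse j := by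
              unfold pvF; rw [Nat.add_mod_left]
            rw [hF, List.getElem?_drop]
          rw [hsplit]
      · omega

-- A's enumerate-filter comprehension also computes the selected-indices normal form
theorem pv_A (cycle : Int) (offsets : List Int) (inverse : Bool) (hcy : 1 ≤ cycle) :
    ∀ (data : List Int) (k : Nat),
      ((PySem.List.enumerate data (k : Int)).filter
          (fun p => (PySem.Set.contains (PySem.Set.ofList offsets) (PySem.Int.mod p.1 cycle)) != inverse)).map (·.2)
        = (List.range data.length).flatMap
            (fun j => if pvF cycle offsets inverse (k + j) then (data[j]?).toList else []) := by
  intro data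
  induction data with
  | nil => intro k; simp [PySem.List.enumerate_nil]
  | cons x xs ih =>
    intro k
    rw [PySem.List.enumerate_cons, List.filter_cons]
    have hmod : PySem.Int.mod ((k : Nat) : Int) cycle = ((k % cycle.toNat : Nat) : Int) := by
      conv_lhs => rw [show cycle = ((cycle.toNat : Nat) : Int) by omega]
      exact PySem.Int.mod_natCast k cycle.toNat
    have hp : (PySem.Set.contains (PySem.Set.ofList offsets) (PySem.Int.mod ((k : Nat) : Int) cycle) != inverse)
        = pvF cycle offsets inverse k := by
      rw [hmod]; rfl
    have hk1 : ((k : Nat) : Int) + 1 = (((k + 1 : Nat) : Nat) : Int) := by push_cast; ring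
    rw [hk1]
    have htail := ih (k + 1)
    rw [List.length_cons, List.range_succ_eq_map, List.flatMap_cons, List.flatMap_map]
    have htail2 : (List.range xs.length).flatMap
        ((fun j => if pvF cycle offsets inverse (k + j) then ((x :: xs)[j]?).toList else []) ∘ Nat.succ)
        = (List.range xs.length).flatMap
            (fun j => if pvF cycle offsets inverse ((k + 1) + j) then (xs[j]?).toList else []) := by
      apply pv_flatMap_congr
      intro j _
      simp only [Function.comp_apply, Nat.succ_eq_add_one, List.getElem?_cons_succ,
        show k + (j + 1) = (k + 1) + j by omega]
    simp only [hp]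
    by_cases hF : pvF cycle offsets inverse k
    · rw [if_pos hF, List.map_cons, htail, ← htail2]
      simp [hF]
      apply pv_flatMap_congr
      intro j _
      simp [Nat.succ_eq_add_one]
    · rw [if_neg hF, htail, ← htail2]
      simp [hF]
      apply pv_flatMap_congr
      intro j _
      simp [Nat.succ_eq_add_one]

-- ===== VERDICT (by name: the statement is the Claim_ definition above) =====
theorem list_select_every_spec : Claim_equal_list_select_every := by
  intro data cycle offsets inverse _ hpre
  obtain ⟨hcy, -⟩ := hpre
  unfold Spec_list_select_every
  simp only [list_select_every, list_select_every_alt]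
  by_cases hd : data = []
  · subst hd
    rw [if_pos rfl, PySem.List.pyRange_of_pos _ _ (by omega : (0:Int) < cycle)]
    simp
  · rw [if_neg hd]
    have hA := pv_A cycle offsets inverse hcy data 0
    rw [show ((0 : Nat) : Int) = 0 by rfl] at hA
    simp only [Nat.zero_add] at hA
    rw [hA]
    have hsel : (PySem.List.pyRange 0 (min cycle (data.length : Int)) 1).filter
        (fun r => PySem.Set.contains (PySem.Set.ofList offsets) r != inverse)
        = pvSel offsets inverse (min cycle (data.length : Int)) := rfl
    rw [hsel, pv_B_flat data cycle (pvSel offsets inverse (min cycle (data.length : Int))),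
      pv_main cycle (min cycle (data.length : Int)) offsets inverse hcy (by omega) (by omega)
        data.length data (le_refl _) (by omega)]
    rfl
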